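-- pv_equiv track=rewrite | github.com/drekdsouz/LinearProgramming | main.py | find_pivot_column
-- ===== SOURCE A (Python) =====
-- def find_pivot_column(obj: list) -> int:
--     small = []
--     for i in range(len(obj)):
--         if obj[i] < 0:
--             small.append(obj[i])
--     if not small:
--         return -1
--     return obj.index(min(small))
-- ===== SOURCE B (Python) =====
-- def find_pivot_column(obj: list) -> int:
--     best_val = None
--     best_idx = -1
--     for i, x in enumerate(obj):
--         if x < 0 and (best_val is None or x < best_val):
--             best_val = x
--             best_idx = i
--     return best_idx
-- ===== Notes on version B (the rewrite author's own statement) =====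
-- stated objective: simpler
-- what changed: Replaces the three passes (collect negatives, min(), list.index()) by one left-to-right scan keeping the best negative value and its first index, updating only on a strictly smaller value.
import Mathlib
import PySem

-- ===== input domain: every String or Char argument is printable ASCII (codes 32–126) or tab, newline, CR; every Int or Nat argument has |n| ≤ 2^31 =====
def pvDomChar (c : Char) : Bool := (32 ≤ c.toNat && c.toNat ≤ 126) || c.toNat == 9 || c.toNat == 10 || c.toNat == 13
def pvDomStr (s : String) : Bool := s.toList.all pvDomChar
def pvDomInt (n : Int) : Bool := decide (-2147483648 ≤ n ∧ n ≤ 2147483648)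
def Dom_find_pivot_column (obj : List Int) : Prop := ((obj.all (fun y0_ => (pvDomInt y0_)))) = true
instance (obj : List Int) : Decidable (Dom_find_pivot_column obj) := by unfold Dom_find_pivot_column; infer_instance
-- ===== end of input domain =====

-- B replaces A's three passes (collect negatives, min(), list.index()) by one scan
-- tracking the best negative value and its first index; same return value, A is total.

-- ===== PORT A =====
-- A: small = [obj[i] for i in range(len(obj)) if obj[i] < 0]; -1 if empty; else obj.index(min(small)).
-- The two `none`/`-1` fallback branches below are unreachable (small nonempty ⇒ min exists ∈ obj).
def find_pivot_column (obj : List Int) : Int :=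
  let small := (PySem.List.pyRange 0 (obj.length : Int) 1).foldl
      (fun acc i => if PySem.List.pyGetD obj i 0 < 0 then acc ++ [PySem.List.pyGetD obj i 0] else acc) []
  if small = [] then -1
  else
    match PySem.List.min? small (fun x => x) with
    | none => -1
    | some m =>
      match PySem.List.index? obj m with
      | some k => (k : Int)
      | none => -1

-- ===== PORT B =====
def find_pivot_column_alt (obj : List Int) : Int :=
  let st := (PySem.List.enumerate obj 0).foldl
      (fun (s : Option Int × Int) (p : Int × Int) =>
        match s with
        | (none, _) => if p.2 < 0 then (some p.2, p.1) else s
        | (some bv, _) => if p.2 < 0 ∧ p.2 < bv then (some p.2, p.1) else s)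
      (none, -1)
  st.2

-- ===== PRECONDITION & SPEC =====
def Spec_find_pivot_column (obj : List Int) (out : Int) : Prop := out = find_pivot_column_alt obj
instance (obj : List Int) (out : Int) : Decidable (Spec_find_pivot_column obj out) := by unfold Spec_find_pivot_column; infer_instance

-- ===== CLAIM (what is proved, stated in full; the proofs are below) =====
def Claim_equal_find_pivot_column : Prop := ∀ (obj : List Int), Dom_find_pivot_column obj → Spec_find_pivot_column obj (find_pivot_column obj)

-- ===== LEMMAS AND PROOFS =====

-- Reference: min negative value of l together with its first (0-based) index, if any.
def pvRef : List Int → Option (Int × Int)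
  | [] => none
  | x :: t =>
    match pvRef t with
    | none => if x < 0 then some (x, 0) else none
    | some (m, j) =>
      if x < 0 then
        (if x ≤ m then some (x, 0) else some (m, j + 1))
      else some (m, j + 1)

abbrev pvStep : Option Int × Int → Int × Int → Option Int × Int :=
  fun s p =>
    match s with
    | (none, _) => if p.2 < 0 then (some p.2, p.1) else s
    | (some bv, _) => if p.2 < 0 ∧ p.2 < bv then (some p.2, p.1) else s

lemma pvFoldlMinSwap (t : List Int) : ∀ a b : Int, t.foldl min (min a b) = min a (t.foldl min b) := by
  induction t with
  | nil => intro a b; rfl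
  | cons c t ih =>
    intro a b
    simp only [List.foldl_cons, min_assoc]
    exact ih a (min b c)

lemma pvMinCons (x : Int) (s : List Int) :
    PySem.List.min? (x :: s) (fun y => y) =
      some (match PySem.List.min? s (fun y => y) with | none => x | some m => min x m) := by
  cases s with
  | nil => simp [PySem.List.min?]
  | cons y t =>
    rw [PySem.List.min?_id_cons, PySem.List.min?_id_cons]
    simp only [List.foldl_cons]
    have := pvFoldlMinSwap t x y
    simp only [this]

lemma pvRef_none_iff (l : List Int) : pvRef l = none ↔ l.filter (fun x => decide (x < 0)) = [] := by
  induction l with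
  | nil => simp [pvRef]
  | cons x t ih =>
    by_cases hx : x < 0
    · simp only [pvRef, List.filter_cons, hx, decide_true]
      cases h : pvRef t with
      | none => simp
      | some p => cases p with | mk m j => simp; split <;> simp
    · simp only [pvRef, List.filter_cons, hx, decide_false]
      cases h : pvRef t with
      | none => simpa [h] using ih
      | some p =>
        cases p with | mk m j =>
        simp only [if_false, reduceCtorEq, false_iff]
        rw [← ih]; simp [h]

lemma pvRef_some (l : List Int) (m : Int) (j : Int) (h : pvRef l = some (m, j)) :
    m < 0 ∧ PySem.List.min? (l.filter (fun x => decide (x < 0))) (fun y => y) = some m ∧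
      PySem.List.index? l m = some j.toNat ∧ 0 ≤ j := by
  induction l generalizing m j with
  | nil => simp [pvRef] at h
  | cons x t ih =>
    simp only [pvRef] at h
    by_cases hx : x < 0
    · cases ht : pvRef t with
      | none =>
        rw [ht] at h
        simp only [hx, if_true] at h
        rw [Option.some_inj, Prod.mk.injEq] at h
        obtain ⟨rfl, rfl⟩ := h
        have hft := (pvRef_none_iff t).mp ht
        refine ⟨hx, ?_, ?_, le_refl 0⟩
        · simp [hx, hft, PySem.List.min?_id_cons]
        · rw [PySem.List.index?_cons_self]; rfl
      | some p =>
        cases p with | mk m' j' =>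
        rw [ht] at h
        obtain ⟨hm', hmin', hidx', hj'⟩ := ih m' j' ht
        simp only [hx, if_true] at h
        by_cases hle : x ≤ m'
        · rw [if_pos hle, Option.some_inj, Prod.mk.injEq] at h
          obtain ⟨rfl, rfl⟩ := h
          refine ⟨hx, ?_, ?_, le_refl 0⟩
          · rw [List.filter_cons]
            simp only [hx, decide_true, if_true]
            rw [pvMinCons, hmin']
            simp [min_eq_left hle]
          · rw [PySem.List.index?_cons_self]; rfl
        · rw [if_neg hle, Option.some_inj, Prod.mk.injEq] at h
          obtain ⟨rfl, rfl⟩ := h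
          refine ⟨hm', ?_, ?_, by omega⟩
          · rw [List.filter_cons]
            simp only [hx, decide_true, if_true]
            rw [pvMinCons, hmin']
            have hlt : m' ≤ x := by omega
            simp [min_eq_right hlt]
          · rw [PySem.List.index?_cons_of_ne t (by omega), hidx']
            simp; omega
    · cases ht : pvRef t with
      | none => rw [ht] at h; simp [hx] at h
      | some p =>
        cases p with | mk m' j' =>
        rw [ht] at h
        simp only [hx, if_false, Option.some_inj, Prod.mk.injEq] at h
        obtain ⟨rfl, rfl⟩ := h
        obtain ⟨hm', hmin', hidx', hj'⟩ := ih m' j' ht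
        refine ⟨hm', ?_, ?_, by omega⟩
        · rw [List.filter_cons]; simp [hx, hmin']
        · rw [PySem.List.index?_cons_of_ne t (by omega), hidx']
          simp; omega

-- combined state after B's fold, given the reference answer for the remaining list
def pvCombine (s : Option Int × Int) (i : Int) : Option (Int × Int) → Option Int × Int
  | none => s
  | some (m, j) =>
    match s with
    | (none, _) => (some m, i + j)
    | (some bv, bi) => if m < bv then (some m, i + j) else (some bv, bi)

lemma pvStep_none (bi i x : Int) :
    pvStep (none, bi) (i, x) = if x < 0 then (some x, i) else (none, bi) := rfl
lemma pvStep_some (bv bi i x : Int) :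
    pvStep (some bv, bi) (i, x) = if x < 0 ∧ x < bv then (some x, i) else (some bv, bi) := rfl
lemma pvCombine_none (s : Option Int × Int) (i : Int) : pvCombine s i none = s := rfl
lemma pvCombine_none_some (bi i m j : Int) :
    pvCombine (none, bi) i (some (m, j)) = (some m, i + j) := rfl
lemma pvCombine_some_some (bv bi i m j : Int) :
    pvCombine (some bv, bi) i (some (m, j)) = if m < bv then (some m, i + j) else (some bv, bi) := rfl

lemma pvFoldB (l : List Int) : ∀ (i : Int) (s : Option Int × Int),
    (PySem.List.enumerate l i).foldl pvStep s = pvCombine s i (pvRef l) := by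
  induction l with
  | nil => intro i s; simp [PySem.List.enumerate_nil, pvRef, pvCombine]
  | cons x t ih =>
    intro i s
    rw [PySem.List.enumerate_cons, List.foldl_cons, ih]
    obtain ⟨b, bi⟩ := s
    cases ht : pvRef t with
    | none =>
      cases b with
      | none =>
        by_cases hx : x < 0
        · have hr : pvRef (x :: t) = some (x, 0) := by simp [pvRef, ht, hx]
          rw [hr, pvStep_none, if_pos hx, pvCombine_none, pvCombine_none_some]
          simp
        · have hr : pvRef (x :: t) = none := by simp [pvRef, ht, hx]
          rw [hr, pvStep_none, if_neg hx, pvCombine_none, pvCombine_none]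
      | some bv =>
        by_cases hc : x < 0 ∧ x < bv
        · have hr : pvRef (x :: t) = some (x, 0) := by simp [pvRef, ht, hc.1]
          rw [hr, pvStep_some, if_pos hc, pvCombine_none, pvCombine_some_some, if_pos hc.2]
          simp
        · by_cases hx : x < 0
          · have hr : pvRef (x :: t) = some (x, 0) := by simp [pvRef, ht, hx]
            rw [hr, pvStep_some, if_neg hc, pvCombine_none, pvCombine_some_some,
              if_neg (by omega : ¬ x < bv)]
          · have hr : pvRef (x :: t) = none := by simp [pvRef, ht, hx]
            rw [hr, pvStep_some, if_neg hc, pvCombine_none, pvCombine_none]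
    | some p =>
      cases p with | mk m j =>
      have hm0 : m < 0 := (pvRef_some t m j ht).1
      cases b with
      | none =>
        by_cases hx : x < 0
        · by_cases hle : x ≤ m
          · have hr : pvRef (x :: t) = some (x, 0) := by simp [pvRef, ht, hx, hle]
            rw [hr, pvStep_none, if_pos hx, pvCombine_some_some,
              if_neg (by omega : ¬ m < x), pvCombine_none_some]
            simp
          · have hr : pvRef (x :: t) = some (m, j + 1) := by simp [pvRef, ht, hx, hle]
            rw [hr, pvStep_none, if_pos hx, pvCombine_some_some,
              if_pos (by omega : m < x), pvCombine_none_some,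
              show i + 1 + j = i + (j + 1) from by omega]
        · have hr : pvRef (x :: t) = some (m, j + 1) := by simp [pvRef, ht, hx]
          rw [hr, pvStep_none, if_neg hx, pvCombine_none_some, pvCombine_none_some,
            show i + 1 + j = i + (j + 1) from by omega]
      | some bv =>
        by_cases hc : x < 0 ∧ x < bv
        · by_cases hle : x ≤ m
          · have hr : pvRef (x :: t) = some (x, 0) := by simp [pvRef, ht, hc.1, hle]
            rw [hr, pvStep_some, if_pos hc, pvCombine_some_some,
              if_neg (by omega : ¬ m < x), pvCombine_some_some, if_pos hc.2]
            simp
          · have hr : pvRef (x :: t) = some (m, j + 1) := by simp [pvRef, ht, hc.1, hle]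
            rw [hr, pvStep_some, if_pos hc, pvCombine_some_some,
              if_pos (by omega : m < x), pvCombine_some_some,
              if_pos (by omega : m < bv),
              show i + 1 + j = i + (j + 1) from by omega]
        · by_cases hx : x < 0
          · by_cases hle : x ≤ m
            · have hr : pvRef (x :: t) = some (x, 0) := by simp [pvRef, ht, hx, hle]
              rw [hr, pvStep_some, if_neg hc, pvCombine_some_some,
                if_neg (by omega : ¬ m < bv), pvCombine_some_some,
                if_neg (by omega : ¬ x < bv)]
            · have hr : pvRef (x :: t) = some (m, j + 1) := by simp [pvRef, ht, hx, hle]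
              rw [hr, pvStep_some, if_neg hc, pvCombine_some_some, pvCombine_some_some]
              by_cases hmb : m < bv
              · rw [if_pos hmb, if_pos hmb, show i + 1 + j = i + (j + 1) from by omega]
              · rw [if_neg hmb, if_neg hmb]
          · have hr : pvRef (x :: t) = some (m, j + 1) := by simp [pvRef, ht, hx]
            rw [hr, pvStep_some, if_neg hc, pvCombine_some_some, pvCombine_some_some]
            by_cases hmb : m < bv
            · rw [if_pos hmb, if_pos hmb, show i + 1 + j = i + (j + 1) from by omega]
            · rw [if_neg hmb, if_neg hmb]

lemma pvAltChar (obj : List Int) : find_pivot_column_alt obj =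
    (match pvRef obj with | none => -1 | some (_, j) => j) := by
  unfold find_pivot_column_alt
  rw [show ((fun (s : Option Int × Int) (p : Int × Int) =>
        match s with
        | (none, _) => if p.2 < 0 then (some p.2, p.1) else s
        | (some bv, _) => if p.2 < 0 ∧ p.2 < bv then (some p.2, p.1) else s)) = pvStep from rfl]
  rw [pvFoldB obj 0 (none, -1)]
  cases h : pvRef obj with
  | none => simp [pvCombine]
  | some p => cases p with | mk m j => simp [pvCombine]

-- ===== VERDICT (by name: the statement is the Claim_ definition above) =====
theorem find_pivot_column_spec : Claim_equal_find_pivot_column := by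
  unfold Claim_equal_find_pivot_column Spec_find_pivot_column
  intro obj _
  rw [pvAltChar]
  unfold find_pivot_column
  rw [PySem.List.foldl_pyRange_zero_pyGetD' obj 0
        (fun acc v => if v < 0 then acc ++ [v] else acc) []]
  rw [PySem.List.foldl_append_ite_eq_filter]
  dsimp only
  simp only [List.nil_append]
  cases h : pvRef obj with
  | none =>
    rw [if_pos ((pvRef_none_iff obj).mp h)]
  | some p =>
    cases p with | mk m j =>
    obtain ⟨hm0, hmin, hidx, hj⟩ := pvRef_some obj m j h
    rw [if_neg (fun hc => by rw [hc] at hmin; simp [PySem.List.min?] at hmin)]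
    rw [hmin]
    rw [PySem.List.index?_eq_idxOf?] at hidx
    simp [hidx, Int.toNat_of_nonneg hj]
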